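-- pv_equiv track=rewrite | github.com/lulojrz/guia7-testing-python | guia7.py | ceroPosicionesPares2
-- ===== SOURCE A (Python) =====
-- def ceroPosicionesPares2(x:list[int])-> list[int]:
--     nueva_lista=[]
--     for num in range(0,len(x)):
--         if num%2==0:
--             nueva_lista.append(0)
--
--         else :
--             nueva_lista.append(num)
--
--     return nueva_lista
-- ===== SOURCE B (Python) =====
-- def ceroPosicionesPares2(x: list[int]) -> list[int]:
--     res = [0] * len(x)
--     res[1::2] = range(1, len(x), 2)
--     return res
-- ===== Notes on version B (the rewrite author's own statement) =====
-- stated objective: idiomatic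
-- what changed: Replaces the per-index parity branch with a prefill of zeros ([0]*n) followed by one strided slice assignment writing the odd indices from a range.
import Mathlib
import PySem

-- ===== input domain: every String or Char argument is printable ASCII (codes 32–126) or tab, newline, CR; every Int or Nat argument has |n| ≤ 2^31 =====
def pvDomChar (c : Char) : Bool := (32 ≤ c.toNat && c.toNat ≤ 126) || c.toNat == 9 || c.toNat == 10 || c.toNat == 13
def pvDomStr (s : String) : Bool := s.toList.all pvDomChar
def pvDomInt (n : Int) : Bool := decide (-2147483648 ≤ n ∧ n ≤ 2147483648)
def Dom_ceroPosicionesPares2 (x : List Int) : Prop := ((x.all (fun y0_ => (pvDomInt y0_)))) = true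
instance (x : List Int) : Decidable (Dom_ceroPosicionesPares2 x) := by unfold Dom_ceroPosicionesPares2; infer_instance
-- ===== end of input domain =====

-- B replaces A's per-index parity branch with a prefill of zeros plus one strided write
-- of the odd indices (idiomatic slice-assignment decomposition); same O(n) cost.

-- ===== PORT A =====
def ceroPosicionesPares2 (x : List Int) : List Int :=
  (PySem.List.pyRange 0 (x.length : Int) 1).foldl
    (fun nueva_lista num => nueva_lista ++ [if PySem.Int.mod num 2 == 0 then 0 else num]) []

-- ===== PORT B =====
-- hand port of the strided slice assignment res[1::2] = vals (exact: writes vals at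
-- positions pos, pos+2, …; in B's use the value count always matches the slice length)
def pvWriteStride (res : List Int) (pos : Nat) (vals : List Int) : List Int :=
  match vals with
  | [] => res
  | v :: vs => pvWriteStride (res.set pos v) (pos + 2) vs

def ceroPosicionesPares2_alt (x : List Int) : List Int :=
  pvWriteStride (List.replicate x.length 0) 1 (PySem.List.pyRange 1 (x.length : Int) 2)

-- ===== PRECONDITION & SPEC =====
def Spec_ceroPosicionesPares2 (x : List Int) (out : List Int) : Prop := out = ceroPosicionesPares2_alt x
instance (x : List Int) (out : List Int) : Decidable (Spec_ceroPosicionesPares2 x out) := by unfold Spec_ceroPosicionesPares2; infer_instance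

-- ===== CLAIM (what is proved, stated in full; the proofs are below) =====
def Claim_equal_ceroPosicionesPares2 : Prop := ∀ (x : List Int), Dom_ceroPosicionesPares2 x → Spec_ceroPosicionesPares2 x (ceroPosicionesPares2 x)

-- ===== LEMMAS AND PROOFS =====

def pvTarget (n : Nat) : List Int :=
  (List.range n).map (fun (j : Nat) => if PySem.Int.mod (j : Int) 2 == 0 then 0 else (j : Int))

lemma foldA (l : List Int) (acc : List Int) :
    l.foldl (fun a num => a ++ [if PySem.Int.mod num 2 == 0 then (0 : Int) else num]) acc
      = acc ++ l.map (fun num => if PySem.Int.mod num 2 == 0 then 0 else num) := by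
  induction l generalizing acc with
  | nil => simp
  | cons v vs ih => rw [List.foldl_cons, ih]; simp

lemma A_eq (x : List Int) : ceroPosicionesPares2 x = pvTarget x.length := by
  unfold ceroPosicionesPares2 pvTarget
  rw [foldA, PySem.List.pyRange_one, List.map_map, List.nil_append]
  have h : ((x.length : Int) - 0).toNat = x.length := by omega
  rw [h]
  apply List.map_congr_left
  intro k _
  simp only [Function.comp_apply, Int.zero_add]

lemma ws_getElem? (vals : List Int) : ∀ (res : List Int) (pos j : Nat),
    (pvWriteStride res pos vals)[j]? =
      if pos ≤ j ∧ (j - pos) % 2 = 0 ∧ (j - pos) / 2 < vals.length ∧ j < res.length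
      then vals[(j - pos) / 2]?
      else res[j]? := by
  induction vals with
  | nil => intro res pos j; simp [pvWriteStride]
  | cons v vs ih =>
    intro res pos j
    simp only [pvWriteStride, ih, List.length_set, List.getElem?_set, List.length_cons]
    by_cases hpj : pos = j
    · subst hpj
      have h0 : (pos - pos) / 2 = 0 := by omega
      split_ifs with h1 h2 <;> simp_all <;> omega
    · split_ifs with h1 h2
      · obtain ⟨ha, hb, hc, hd⟩ := h1
        have he : (j - pos) / 2 = (j - (pos + 2)) / 2 + 1 := by omega
        rw [he]; simp
      · exfalso; omega
      · exfalso; omega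
      · simp

lemma B_eq (x : List Int) : ceroPosicionesPares2_alt x = pvTarget x.length := by
  unfold ceroPosicionesPares2_alt
  set n := x.length with hn
  have hrange : PySem.List.pyRange 1 (n : Int) 2
      = (List.range (n / 2)).map (fun (k : Nat) => (1 : Int) + 2 * (k : Int)) := by
    rw [PySem.List.pyRange_of_pos _ _ (by norm_num : (0:Int) < 2)]
    have h : (if (1:Int) < (n:Int) then (((n:Int) - 1 + 2 - 1) / 2).toNat else 0) = n / 2 := by
      split_ifs with h1 <;> omega
    rw [h]
  rw [hrange]
  apply List.ext_getElem?
  intro j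
  rw [ws_getElem?, List.length_map, List.length_range, List.length_replicate]
  unfold pvTarget
  rw [List.getElem?_map, List.getElem?_map, List.getElem?_replicate]
  by_cases hj : j < n
  · rw [List.getElem?_range hj]
    by_cases hodd : j % 2 = 1
    · have hcond : 1 ≤ j ∧ (j - 1) % 2 = 0 ∧ (j - 1) / 2 < n / 2 ∧ j < n := by omega
      rw [if_pos hcond, List.getElem?_range (by omega : (j-1)/2 < n/2)]
      have hji : ¬ (PySem.Int.mod ((j : Int)) 2 == 0) = true := by
        rw [PySem.Int.mod_eq_emod_of_pos (by norm_num)]; simp; omega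
      simp only [Option.map_some, if_neg hji]
      congr 1
      omega
    · have hcond : ¬ (1 ≤ j ∧ (j - 1) % 2 = 0 ∧ (j - 1) / 2 < n / 2 ∧ j < n) := by omega
      rw [if_neg hcond, if_pos hj]
      have hji : (PySem.Int.mod ((j : Int)) 2 == 0) = true := by
        rw [PySem.Int.mod_eq_emod_of_pos (by norm_num)]; simp; omega
      simp only [Option.map_some, if_pos hji]
  · have hcond : ¬ (1 ≤ j ∧ (j - 1) % 2 = 0 ∧ (j - 1) / 2 < n / 2 ∧ j < n) := by omega
    rw [if_neg hcond, if_neg hj]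
    have h2 : (List.range n)[j]? = none := by simp; omega
    rw [h2]
    rfl

-- ===== VERDICT (by name: the statement is the Claim_ definition above) =====
theorem ceroPosicionesPares2_spec : Claim_equal_ceroPosicionesPares2 := by
  intro x _
  unfold Spec_ceroPosicionesPares2
  rw [A_eq, B_eq]
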